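-- pv_equiv track=rewrite | github.com/asifhussain60/CORTEX | src/conversation_capture/auto_detection.py | _generate_quality_suggestions
-- ===== SOURCE A (Python) =====
-- from typing import Dict, List, Any, Optional, Tuple
--
-- def _generate_quality_suggestions(issues: List[str]) -> List[str]:
--     """Generate improvement suggestions based on issues"""
--     suggestions = []
--
--     for issue in issues:
--         if "too short" in issue:
--             suggestions.append("Consider capturing longer conversations with more detail")
--         elif "brief" in issue:
--             suggestions.append("Look for conversations with more substantial exchanges")
--         elif "technical depth" in issue:
--             suggestions.append("Focus on conversations involving problem-solving or technical discussions")
--         elif "technical entities" in issue: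
--             suggestions.append("Prioritize conversations mentioning specific files, functions, or technologies")
--         elif "technical context" in issue:
--             suggestions.append("Capture conversations with clear technical context and coherent topics")
--
--     if not suggestions:
--         suggestions.append("Conversation quality is good - consider capturing")
--
--     return suggestions
-- ===== SOURCE B (Python) =====
-- from typing import Dict, List, Any, Optional, Tuple
--
-- _SUGGESTION_TABLE = [
--     ("too short", "Consider capturing longer conversations with more detail"),
--     ("brief", "Look for conversations with more substantial exchanges"),
--     ("technical depth", "Focus on conversations involving problem-solving or technical discussions"),
--     ("technical entities", "Prioritize conversations mentioning specific files, functions, or technologies"),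
--     ("technical context", "Capture conversations with clear technical context and coherent topics"),
-- ]
--
-- def _generate_quality_suggestions(issues: List[str]) -> List[str]:
--     # keyword-major staged passes: each keyword, in priority order, claims the
--     # still-unassigned issue slots it occurs in; slots keep the issue order.
--     assigned: List[Optional[str]] = [None] * len(issues)
--     for kw, sug in _SUGGESTION_TABLE:
--         for i, issue in enumerate(issues):
--             if assigned[i] is None and kw in issue:
--                 assigned[i] = sug
--     suggestions = [s for s in assigned if s is not None]
--     return suggestions if suggestions else ["Conversation quality is good - consider capturing"]
-- ===== Notes on version B (the rewrite author's own statement) =====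
-- stated objective: alternative
-- what changed: Inverts the traversal: instead of one pass over issues with a 5-way if/elif ladder per issue, B makes one staged pass per keyword (outer loop over keywords in priority order) filling still-empty per-issue slots, then compacts the slot array; priority is preserved because earlier keywords claim slots first.
import Mathlib
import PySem

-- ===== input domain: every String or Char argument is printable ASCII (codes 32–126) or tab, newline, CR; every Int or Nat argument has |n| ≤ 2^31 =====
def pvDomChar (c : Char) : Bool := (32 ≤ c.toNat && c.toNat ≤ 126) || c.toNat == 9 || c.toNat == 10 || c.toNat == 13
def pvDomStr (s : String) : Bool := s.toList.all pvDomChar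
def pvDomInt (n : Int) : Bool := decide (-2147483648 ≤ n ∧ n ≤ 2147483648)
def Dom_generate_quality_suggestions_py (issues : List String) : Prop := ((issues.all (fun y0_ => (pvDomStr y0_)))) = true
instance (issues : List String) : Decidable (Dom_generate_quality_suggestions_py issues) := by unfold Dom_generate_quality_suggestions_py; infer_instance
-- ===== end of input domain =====

-- B inverts the traversal (keyword-major staged passes over a slot array instead of
-- A's issue-major pass with an if/elif ladder); same cost, alternative algorithm.


-- ===== PORT A =====
-- literal port of A: a fold over the issues with the if/elif ladder, then the emptiness fallback
def generate_quality_suggestions_py (issues : List String) : List String :=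
  let suggestions :=
    issues.foldl (fun suggestions issue =>
      if PySem.Str.isIn "too short" issue then
        suggestions ++ ["Consider capturing longer conversations with more detail"]
      else if PySem.Str.isIn "brief" issue then
        suggestions ++ ["Look for conversations with more substantial exchanges"]
      else if PySem.Str.isIn "technical depth" issue then
        suggestions ++ ["Focus on conversations involving problem-solving or technical discussions"]
      else if PySem.Str.isIn "technical entities" issue then
        suggestions ++ ["Prioritize conversations mentioning specific files, functions, or technologies"]
      else if PySem.Str.isIn "technical context" issue then
        suggestions ++ ["Capture conversations with clear technical context and coherent topics"]
      else suggestions) []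
  if suggestions = [] then
    ["Conversation quality is good - consider capturing"]
  else suggestions

-- ===== PORT B =====
def pvSuggestionTable : List (String × String) :=
  [("too short", "Consider capturing longer conversations with more detail"),
   ("brief", "Look for conversations with more substantial exchanges"),
   ("technical depth", "Focus on conversations involving problem-solving or technical discussions"),
   ("technical entities", "Prioritize conversations mentioning specific files, functions, or technologies"),
   ("technical context", "Capture conversations with clear technical context and coherent topics")]

-- keyword-major staged passes: each keyword, in priority order, claims the still-empty slots
def pvStage (table : List (String × String)) (issues : List String)
    (assigned : List (Option String)) : List (Option String) :=
  table.foldl (fun assigned p =>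
    (assigned.zip issues).map (fun q =>
      if q.1 = none ∧ PySem.Str.isIn p.1 q.2 then some p.2 else q.1)) assigned

def generate_quality_suggestions_py_alt (issues : List String) : List String :=
  let assigned := pvStage pvSuggestionTable issues (issues.map fun _ => none)
  let suggestions := assigned.filterMap id
  if suggestions = [] then
    ["Conversation quality is good - consider capturing"]
  else suggestions

-- ===== PRECONDITION & SPEC =====
def Spec_generate_quality_suggestions_py (issues : List String) (out : List String) : Prop := out = generate_quality_suggestions_py_alt issues
instance (issues : List String) (out : List String) : Decidable (Spec_generate_quality_suggestions_py issues out) := by unfold Spec_generate_quality_suggestions_py; infer_instance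

-- ===== CLAIM (what is proved, stated in full; the proofs are below) =====
def Claim_equal_generate_quality_suggestions_py : Prop := ∀ (issues : List String), Dom_generate_quality_suggestions_py issues → Spec_generate_quality_suggestions_py issues (generate_quality_suggestions_py issues)

-- ===== LEMMAS AND PROOFS =====

-- the first table entry whose keyword occurs in the issue (proof-side characterisation)
def pvFirst (table : List (String × String)) (issue : String) : Option String :=
  (table.find? (fun p => PySem.Str.isIn p.1 issue)).map (·.2)

theorem pv_zipWith_fst {α β : Type} (a : List α) (b : List β) (h : a.length = b.length) :
    List.zipWith (fun x (_ : β) => x) a b = a := by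
  induction a generalizing b with
  | nil => simp
  | cons x xs ih =>
    cases b with
    | nil => simp at h
    | cons y ys => simp_all

theorem pv_zip_map {α β γ : Type} (f : α × β → γ) (a : List α) (b : List β) :
    (a.zip b).map f = List.zipWith (fun x y => f (x, y)) a b := by
  induction a generalizing b with
  | nil => simp
  | cons x xs ih =>
    cases b with
    | nil => simp
    | cons y ys => simp_all

theorem pv_zipWith_zipWith {α β γ δ : Type} (g : γ → β → δ) (f : α → β → γ)
    (a : List α) (b : List β) :
    List.zipWith g (List.zipWith f a b) b = List.zipWith (fun x y => g (f x y) y) a b := by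
  induction a generalizing b with
  | nil => simp
  | cons x xs ih =>
    cases b with
    | nil => simp
    | cons y ys => simp_all

theorem pv_zipWith_const_map {α β γ : Type} (f : α → β → γ) (c : α) (b : List β) :
    List.zipWith f (b.map fun _ => c) b = b.map (fun y => f c y) := by
  induction b with
  | nil => simp
  | cons y ys ih => simp_all

-- the staged passes fill each still-empty slot with the first matching keyword's suggestion
theorem pvStage_eq (table : List (String × String)) (issues : List String)
    (a : List (Option String)) (h : a.length = issues.length) :
    pvStage table issues a =
      List.zipWith (fun ao issue => match ao with
        | some s => some s
        | none => pvFirst table issue) a issues := by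
  induction table generalizing a with
  | nil =>
    have hf : (fun (ao : Option String) (issue : String) =>
        match ao with | some s => some s | none => pvFirst [] issue) =
        fun ao _ => ao := by
      funext ao issue; cases ao <;> simp [pvFirst]
    simp [pvStage, hf, pv_zipWith_fst a issues h]
  | cons p rest ih =>
    have hstep : pvStage (p :: rest) issues a =
        pvStage rest issues
          ((a.zip issues).map (fun q =>
            if q.1 = none ∧ PySem.Str.isIn p.1 q.2 then some p.2 else q.1)) := by
      simp [pvStage]
    rw [hstep, pv_zip_map]
    have hlen : (List.zipWith (fun x y =>
        if x = none ∧ PySem.Str.isIn p.1 y then some p.2 else x) a issues).length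
        = issues.length := by
      simp [List.length_zipWith, h]
    rw [ih _ hlen, pv_zipWith_zipWith]
    congr 1
    funext ao issue
    cases ao with
    | some s => simp
    | none =>
      simp only [pvFirst, List.find?, PySem.Str.isIn]
      cases hc : PySem.Chars.isIn p.1.toList issue.toList <;> simp_all

-- A's ladder on one issue produces exactly the first table match
theorem pv_step_eq (issue : String) :
    (if PySem.Str.isIn "too short" issue then
        ["Consider capturing longer conversations with more detail"]
      else if PySem.Str.isIn "brief" issue then
        ["Look for conversations with more substantial exchanges"]
      else if PySem.Str.isIn "technical depth" issue then
        ["Focus on conversations involving problem-solving or technical discussions"]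
      else if PySem.Str.isIn "technical entities" issue then
        ["Prioritize conversations mentioning specific files, functions, or technologies"]
      else if PySem.Str.isIn "technical context" issue then
        ["Capture conversations with clear technical context and coherent topics"]
      else []) = (pvFirst pvSuggestionTable issue).toList := by
  simp only [pvFirst, pvSuggestionTable, List.find?]
  split_ifs <;> simp_all

-- A's fold accumulates exactly the first-match suggestions, in issue order
theorem pv_fold_eq (issues : List String) (acc : List String) :
    issues.foldl (fun suggestions issue =>
      if PySem.Str.isIn "too short" issue then
        suggestions ++ ["Consider capturing longer conversations with more detail"]
      else if PySem.Str.isIn "brief" issue then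
        suggestions ++ ["Look for conversations with more substantial exchanges"]
      else if PySem.Str.isIn "technical depth" issue then
        suggestions ++ ["Focus on conversations involving problem-solving or technical discussions"]
      else if PySem.Str.isIn "technical entities" issue then
        suggestions ++ ["Prioritize conversations mentioning specific files, functions, or technologies"]
      else if PySem.Str.isIn "technical context" issue then
        suggestions ++ ["Capture conversations with clear technical context and coherent topics"]
      else suggestions) acc
    = acc ++ issues.filterMap (fun issue => pvFirst pvSuggestionTable issue) := by
  induction issues generalizing acc with
  | nil => simp
  | cons i rest ih =>
    have hstep : ∀ (a : List String),
        (if PySem.Str.isIn "too short" i then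
            a ++ ["Consider capturing longer conversations with more detail"]
          else if PySem.Str.isIn "brief" i then
            a ++ ["Look for conversations with more substantial exchanges"]
          else if PySem.Str.isIn "technical depth" i then
            a ++ ["Focus on conversations involving problem-solving or technical discussions"]
          else if PySem.Str.isIn "technical entities" i then
            a ++ ["Prioritize conversations mentioning specific files, functions, or technologies"]
          else if PySem.Str.isIn "technical context" i then
            a ++ ["Capture conversations with clear technical context and coherent topics"]
          else a) = a ++ (pvFirst pvSuggestionTable i).toList := by
      intro a
      rw [← pv_step_eq i]
      split_ifs <;> simp
    simp only [List.foldl_cons, List.filterMap_cons]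
    rw [hstep, ih]
    cases pvFirst pvSuggestionTable i <;> simp [Option.toList]

-- ===== VERDICT (by name: the statement is the Claim_ definition above) =====
theorem generate_quality_suggestions_py_spec : Claim_equal_generate_quality_suggestions_py := by
  intro issues _
  unfold Spec_generate_quality_suggestions_py generate_quality_suggestions_py generate_quality_suggestions_py_alt
  rw [pv_fold_eq issues [],
      pvStage_eq pvSuggestionTable issues (issues.map fun _ => none) (by simp),
      pv_zipWith_const_map]
  simp
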